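-- pv_equiv track=rewrite | github.com/PavelPutin/labs-4-course | string algorithms/prefiZValues.py | zp_to_bp
-- ===== SOURCE A (Python) =====
-- def zp_to_bp(zp):
--   n = len(zp)
--   bp = [0] * n
--   for j in range(1, n):
--     for i in range(j + zp[j] - 1, j - 1, -1):
--       if bp[i] > 0:
--         break
--       bp[i] = i - j + 1
--   return bp
-- ===== SOURCE B (Python) =====
-- def zp_to_bp(zp):
--   n = len(zp)
--   bp = [0] * n
--   for j in range(1, n):
--     z = zp[j]
--     if z > 0:
--       e = j + z - 1
--       bp[e] = max(bp[e], z)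
--   for i in range(n - 1, 0, -1):
--     bp[i - 1] = max(bp[i - 1], bp[i] - 1)
--   return bp
-- ===== Notes on version B (the rewrite author's own statement) =====
-- stated objective: alternative
-- what changed: Replaced A's nested fill-backward-with-break loops by the classic two-pass Z-to-prefix conversion: one flat pass marking each match endpoint with the max match length, then one flat backward pass propagating borders (bp[i-1] = max(bp[i-1], bp[i]-1)).
import Mathlib
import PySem

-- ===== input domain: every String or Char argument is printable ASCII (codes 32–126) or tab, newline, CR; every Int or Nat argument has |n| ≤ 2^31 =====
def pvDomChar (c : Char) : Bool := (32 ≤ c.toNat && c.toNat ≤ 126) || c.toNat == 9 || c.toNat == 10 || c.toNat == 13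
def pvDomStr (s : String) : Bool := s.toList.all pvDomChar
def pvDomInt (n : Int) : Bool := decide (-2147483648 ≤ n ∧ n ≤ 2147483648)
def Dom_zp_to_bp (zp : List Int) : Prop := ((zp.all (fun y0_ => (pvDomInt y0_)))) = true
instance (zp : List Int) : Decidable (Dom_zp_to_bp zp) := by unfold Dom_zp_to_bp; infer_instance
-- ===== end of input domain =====

-- B replaces A's nested fill-with-break loops by the classic two flat passes (mark each
-- match endpoint with max, then propagate borders backward); objective: alternative/simpler.

-- ===== PORT A =====
-- Inner loop 'for i in range(j+zp[j]-1, j-1, -1): if bp[i] > 0: break; bp[i] = i-j+1'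
-- ported as structural recursion on the iteration count k = len(range) = max(0, zp[j]);
-- i stays ≥ j ≥ 1 throughout, so the Nat index is exact on Pre_.
def zpA_fill (j : Nat) : Nat → Nat → List Int → List Int
  | 0, _, bp => bp
  | k + 1, i, bp =>
    if bp.getD i 0 > 0 then bp
    else zpA_fill j k (i - 1) (bp.set i ((i : Int) - j + 1))

-- Outer loop 'for j in range(1, n)': recursion where pass j = J+1 runs after passes 1..J.
def zpA_outer (zp : List Int) : Nat → List Int → List Int
  | 0, bp => bp
  | J + 1, bp =>
    let bp' := zpA_outer zp J bp
    let z := zp.getD (J + 1) 0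
    zpA_fill (J + 1) z.toNat ((J + 1) + z.toNat - 1) bp'

def zp_to_bp (zp : List Int) : List Int :=
  zpA_outer zp (zp.length - 1) (List.replicate zp.length 0)

-- ===== PORT B =====
-- First pass: for j in range(1, n): if zp[j] > 0: e = j+zp[j]-1; bp[e] = max(bp[e], zp[j]).
def zpB_mark (zp : List Int) : Nat → List Int → List Int
  | 0, bp => bp
  | J + 1, bp =>
    let bp' := zpB_mark zp J bp
    let z := zp.getD (J + 1) 0
    if 0 < z then
      let e := (J + 1) + (z - 1).toNat
      bp'.set e (max (bp'.getD e 0) z)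
    else bp'

-- Second pass: for i in range(n-1, 0, -1): bp[i-1] = max(bp[i-1], bp[i]-1);
-- recursion on i (the counter m is the current i).
def zpB_prop : Nat → List Int → List Int
  | 0, bp => bp
  | i + 1, bp => zpB_prop i (bp.set i (max (bp.getD i 0) (bp.getD (i + 1) 0 - 1)))

def zp_to_bp_alt (zp : List Int) : List Int :=
  zpB_prop (zp.length - 1) (zpB_mark zp (zp.length - 1) (List.replicate zp.length 0))

-- ===== PRECONDITION & SPEC =====
-- Pre_ excludes exactly the inputs on which the Python A raises IndexError:
-- some j ≥ 1 with zp[j] > n - j makes A (and B) index bp out of range.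
def Pre_zp_to_bp (zp : List Int) : Prop :=
  ∀ j ∈ List.range zp.length, 1 ≤ j → 0 < zp.getD j 0 → (j : Int) + zp.getD j 0 ≤ zp.length

instance (zp : List Int) : Decidable (Pre_zp_to_bp zp) := by unfold Pre_zp_to_bp; infer_instance

def pvWitness_zp_to_bp : List Int := [0, 2, 1, 0]

def Spec_zp_to_bp (zp : List Int) (out : List Int) : Prop := out = zp_to_bp_alt zp
instance (zp : List Int) (out : List Int) : Decidable (Spec_zp_to_bp zp out) := by unfold Spec_zp_to_bp; infer_instance

-- ===== CLAIM (what is proved, stated in full; the proofs are below) =====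
def Claim_equal_zp_to_bp : Prop := ∀ (zp : List Int), Dom_zp_to_bp zp → Pre_zp_to_bp zp → Spec_zp_to_bp zp (zp_to_bp zp)

-- ===== LEMMAS AND PROOFS =====

-- sU zp J i: the largest border value i-j+1 contributed to position i by passes j = 1..J
-- (0 if none), i.e. max of {i-j+1 : 1 ≤ j ≤ J, j ≤ i, zp[j] ≥ i-j+1} ∪ {0}.
def sU (zp : List Int) : Nat → Nat → Int
  | 0, _ => 0
  | J + 1, i =>
    if (J + 1 ≤ i) ∧ ((i : Int) - J ≤ zp.getD (J + 1) 0) then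
      max (sU zp J i) ((i : Int) - J)
    else sU zp J i

-- mU zp J e: the mark B's first pass leaves at position e after passes j = 1..J.
def mU (zp : List Int) : Nat → Nat → Int
  | 0, _ => 0
  | J + 1, e =>
    if 0 < zp.getD (J + 1) 0 ∧ ((J : Int) + zp.getD (J + 1) 0 = (e : Int)) then
      max (mU zp J e) (zp.getD (J + 1) 0)
    else mU zp J e

theorem sU_nonneg (zp : List Int) (J i : Nat) : 0 ≤ sU zp J i := by
  induction J with
  | zero => simp [sU]
  | succ J ih => simp only [sU]; split <;> simp [ih]

theorem mU_nonneg (zp : List Int) (J e : Nat) : 0 ≤ mU zp J e := by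
  induction J with
  | zero => simp [mU]
  | succ J ih => simp only [mU]; split <;> simp [ih]

-- witness extraction: a positive value comes from some covering pass
theorem sU_pos_witness (zp : List Int) (J i : Nat) (h : 0 < sU zp J i) :
    ∃ j : Nat, 1 ≤ j ∧ j ≤ J ∧ j ≤ i ∧ (i : Int) - j + 1 ≤ zp.getD j 0 := by
  induction J with
  | zero => simp [sU] at h
  | succ J ih =>
    simp only [sU] at h
    split at h
    · rename_i hc
      exact ⟨J + 1, by omega, le_refl _, hc.1, by push_cast; omega⟩
    · obtain ⟨j, h1, h2, h3, h4⟩ := ih h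
      exact ⟨j, h1, by omega, h3, h4⟩

-- cover propagation: any covering pass j' ≤ J bounds sU from below
theorem sU_ge_of_cover (zp : List Int) (J j' i : Nat) (h1 : 1 ≤ j') (h2 : j' ≤ J)
    (h3 : j' ≤ i) (h4 : (i : Int) - j' + 1 ≤ zp.getD j' 0) :
    (i : Int) - j' + 1 ≤ sU zp J i := by
  induction J with
  | zero => omega
  | succ J ih =>
    simp only [sU]
    by_cases hj : j' = J + 1
    · subst hj
      have : (J + 1 ≤ i) ∧ ((i : Int) - J ≤ zp.getD (J + 1) 0) := ⟨h3, by push_cast at h4 ⊢; omega⟩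
      rw [if_pos this]; push_cast; omega
    · have := ih (by omega)
      split <;> simp <;> omega

-- sU is unchanged by a pass that cannot cover i
theorem sU_succ_of_not_cover (zp : List Int) (J i : Nat)
    (h : ¬ ((J + 1 ≤ i) ∧ ((i : Int) - J ≤ zp.getD (J + 1) 0))) :
    sU zp (J + 1) i = sU zp J i := by
  simp only [sU]; rw [if_neg h]

-- list helpers
theorem getD_set_self {l : List Int} {m : Nat} {v : Int} (h : m < l.length) :
    (l.set m v).getD m 0 = v := by
  simp [List.getD, h]

theorem getD_set_ne {l : List Int} {m k : Nat} {v : Int} (h : k ≠ m) :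
    (l.set m v).getD k 0 = l.getD k 0 := by
  simp [List.getD, Ne.symm h]

-- ===== A-side characterization =====

theorem zpA_fill_spec (zp : List Int) (n j : Nat) (hn : n = zp.length) (hj1 : 1 ≤ j)
    (z : Int) (hz : z = zp.getD j 0) (hzpos : 0 < z) (hje : (j : Int) + z ≤ n) :
    ∀ k i bp, i + 1 = j + k →
      i + 1 ≤ j + z.toNat →
      bp.length = n →
      (∀ m, m ≤ i → bp.getD m 0 = sU zp (j - 1) m) →
      (∀ m, i < m → m < n → bp.getD m 0 = sU zp j m) →
      (∀ m, i < m → m ≤ j + z.toNat - 1 → sU zp (j - 1) m = 0) →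
      (zpA_fill j k i bp).length = n ∧
        ∀ m, m < n → (zpA_fill j k i bp).getD m 0 = sU zp j m := by
  intro k
  induction k with
  | zero =>
    intro i bp hik _ hlen hlow hhigh _
    refine ⟨hlen, fun m hm => ?_⟩
    by_cases hmi : m ≤ i
    · rw [zpA_fill, hlow m hmi]
      obtain ⟨J, hJ⟩ : ∃ J, j = J + 1 := ⟨j - 1, by omega⟩
      subst hJ
      rw [sU_succ_of_not_cover]
      · simp
      · intro hc; omega
    · rw [zpA_fill]
      exact hhigh m (by omega) hm
  | succ k ih =>
    intro i bp hik hile hlen hlow hhigh hzero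
    rw [zpA_fill]
    have hji : j ≤ i := by omega
    have hin : i < n := by omega
    by_cases hpos : bp.getD i 0 > 0
    · rw [if_pos hpos]
      refine ⟨hlen, fun m hm => ?_⟩
      by_cases hmi : m ≤ i
      · rw [hlow m hmi]
        rw [hlow i (le_refl i)] at hpos
        obtain ⟨J, hJ⟩ : ∃ J, j = J + 1 := ⟨j - 1, by omega⟩
        subst hJ
        simp only [Nat.add_sub_cancel] at *
        obtain ⟨j', hj1', hj2', hj3', hj4'⟩ := sU_pos_witness zp J i hpos
        by_cases hcov : (J + 1 ≤ m) ∧ ((m : Int) - J ≤ zp.getD (J + 1) 0)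
        · have hge : (m : Int) - j' + 1 ≤ sU zp J m :=
            sU_ge_of_cover zp J j' m hj1' hj2' (by omega) (by
              have : (m : Int) ≤ (i : Int) := by exact_mod_cast hmi
              omega)
          simp only [sU]
          rw [if_pos hcov]
          have : (m : Int) - J ≤ sU zp J m := by
            have : (j' : Int) ≤ (J : Int) := by exact_mod_cast hj2'
            omega
          omega
        · exact (sU_succ_of_not_cover zp J m hcov).symm
      · exact hhigh m (by omega) hm
    · rw [if_neg hpos]
      have hbpi : bp.getD i 0 = sU zp (j - 1) i := hlow i (le_refl i)
      have hsz : sU zp (j - 1) i = 0 := by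
        have := sU_nonneg zp (j - 1) i
        omega
      apply ih (i - 1)
      · omega
      · omega
      · simpa using hlen
      · intro m hm
        rw [getD_set_ne (by omega)]
        exact hlow m (by omega)
      · intro m hm hmn
        by_cases hmi : m = i
        · subst hmi
          rw [getD_set_self (by omega)]
          obtain ⟨J, hJ⟩ : ∃ J, j = J + 1 := ⟨j - 1, by omega⟩
          subst hJ
          simp only [Nat.add_sub_cancel] at *
          simp only [sU]
          rw [if_pos ⟨hji, by push_cast at hje ⊢; omega⟩, hsz]
          push_cast
          have : (J : Int) + 1 ≤ (m : Int) := by exact_mod_cast hji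
          omega
        · rw [getD_set_ne hmi]
          exact hhigh m (by omega) hmn
      · intro m hm1 hm2
        by_cases hmi : m = i
        · subst hmi; exact hsz
        · exact hzero m (by omega) hm2

theorem zpA_outer_spec (zp : List Int) (n : Nat) (hn : n = zp.length)
    (hpre : Pre_zp_to_bp zp) :
    ∀ J, J ≤ n - 1 →
      (zpA_outer zp J (List.replicate n 0)).length = n ∧
        ∀ m, m < n → (zpA_outer zp J (List.replicate n 0)).getD m 0 = sU zp J m := by
  intro J
  induction J with
  | zero =>
    intro _
    refine ⟨by simp [zpA_outer], fun m hm => ?_⟩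
    simp [zpA_outer, sU, List.getD, hm]
  | succ J ih =>
    intro hJ
    obtain ⟨hlen, hval⟩ := ih (by omega)
    rw [zpA_outer]
    set z := zp.getD (J + 1) 0 with hz
    by_cases hzpos : 0 < z
    · have hje : ((J + 1 : Nat) : Int) + z ≤ n := by
        have := hpre (J + 1) (by rw [List.mem_range]; omega) (by omega) hzpos
        rw [hn]; push_cast at this ⊢; omega
      have hzt : 1 ≤ z.toNat := by omega
      exact zpA_fill_spec zp n (J + 1) hn (by omega) z hz hzpos hje z.toNat
        ((J + 1) + z.toNat - 1) _ (by omega) (by omega) hlen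
        (fun m hm => by simpa using hval m (by
          have : (z.toNat : Int) = z := Int.toNat_of_nonneg (by omega)
          omega))
        (fun m hm1 hm2 => by
          rw [hval m hm2, sU_succ_of_not_cover]
          intro hc
          have : (z.toNat : Int) = z := Int.toNat_of_nonneg (by omega)
          omega)
        (fun m hm1 hm2 => by omega)
    · have hz0 : z.toNat = 0 := by omega
      rw [hz0]
      rw [zpA_fill]
      refine ⟨hlen, fun m hm => ?_⟩
      rw [hval m hm, sU_succ_of_not_cover]
      intro hc
      have : (m : Int) - J ≥ 1 := by
        have : (J : Int) + 1 ≤ (m : Int) := by exact_mod_cast hc.1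
        omega
      omega

-- ===== B-side characterization =====

theorem zpB_mark_spec (zp : List Int) (n : Nat) (hn : n = zp.length)
    (hpre : Pre_zp_to_bp zp) :
    ∀ J, J ≤ n - 1 →
      (zpB_mark zp J (List.replicate n 0)).length = n ∧
        ∀ e, e < n → (zpB_mark zp J (List.replicate n 0)).getD e 0 = mU zp J e := by
  intro J
  induction J with
  | zero =>
    intro _
    refine ⟨by simp [zpB_mark], fun e he => ?_⟩
    simp [zpB_mark, mU, List.getD, he]
  | succ J ih =>
    intro hJ
    obtain ⟨hlen, hval⟩ := ih (by omega)
    rw [zpB_mark]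
    set z := zp.getD (J + 1) 0 with hz
    by_cases hzpos : 0 < z
    · rw [if_pos hzpos]
      have hje : ((J + 1 : Nat) : Int) + z ≤ n := by
        have := hpre (J + 1) (by rw [List.mem_range]; omega) (by omega) hzpos
        rw [hn]; push_cast at this ⊢; omega
      have hzt : ((z - 1).toNat : Int) = z - 1 := Int.toNat_of_nonneg (by omega)
      set e0 := (J + 1) + (z - 1).toNat with he0
      have he0n : e0 < n := by
        have : (e0 : Int) = (J : Int) + z := by rw [he0]; push_cast [hzt]; omega
        omega
      refine ⟨by simpa using hlen, fun e he => ?_⟩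
      by_cases hee : e = e0
      · subst hee
        rw [getD_set_self (by omega), hval e0 he0n]
        simp only [mU, ← hz]
        rw [if_pos ⟨hzpos, by push_cast [he0, hzt]; omega⟩]
      · rw [getD_set_ne hee, hval e he]
        simp only [mU, ← hz]
        rw [if_neg]
        intro hc
        apply hee
        have : (e : Int) = (e0 : Int) := by push_cast [he0, hzt]; omega
        exact_mod_cast this
    · rw [if_neg hzpos]
      refine ⟨hlen, fun e he => ?_⟩
      rw [hval e he]
      simp only [mU, ← hz]
      rw [if_neg (by intro hc; exact hzpos hc.1)]

-- the final value propagation computes at t when the loop starts at i = t + k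
def Fv (bp : List Int) : Nat → Nat → Int
  | 0, t => bp.getD t 0
  | k + 1, t => max (bp.getD t 0) (Fv bp k (t + 1) - 1)

theorem Fv_set_top (bp : List Int) (k t : Nat) (hlen : t + k < bp.length) :
    Fv (bp.set (t + k) (max (bp.getD (t + k) 0) (bp.getD (t + k + 1) 0 - 1))) k t
      = Fv bp (k + 1) t := by
  induction k generalizing t with
  | zero => simp only [Fv, Nat.add_zero] at *; rw [getD_set_self hlen]
  | succ k ih =>
    simp only [Fv]
    rw [getD_set_ne (by omega)]
    have := ih (t + 1) (by omega)
    rw [show t + 1 + k = t + (k + 1) by omega] at this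
    rw [this]
    simp [Fv]

theorem zpB_prop_spec : ∀ (m : Nat) (bp : List Int), m < bp.length →
    (zpB_prop m bp).length = bp.length ∧
      (∀ t, m ≤ t → (zpB_prop m bp).getD t 0 = bp.getD t 0) ∧
      (∀ t, t < m → (zpB_prop m bp).getD t 0 = Fv bp (m - t) t) := by
  intro m
  induction m with
  | zero => intro bp _; exact ⟨rfl, fun t _ => rfl, fun t ht => by omega⟩
  | succ m ih =>
    intro bp hm
    rw [zpB_prop]
    set bp1 := bp.set m (max (bp.getD m 0) (bp.getD (m + 1) 0 - 1)) with hbp1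
    obtain ⟨hlen, hhi, hlo⟩ := ih bp1 (by rw [hbp1, List.length_set]; omega)
    refine ⟨by rw [hlen, hbp1, List.length_set], fun t ht => ?_, fun t ht => ?_⟩
    · rw [hhi t (by omega), hbp1, getD_set_ne (by omega)]
    · by_cases htm : t = m
      · subst htm
        rw [hhi t (le_refl t), hbp1, getD_set_self (by omega)]
        simp [Fv]
      · rw [hlo t (by omega)]
        have hkey := Fv_set_top bp (m - t) t (by omega)
        rw [show t + (m - t) = m by omega] at hkey
        rw [← hbp1] at hkey
        rw [hkey]
        congr 1
        omega

-- the recurrence tying B's backward pass to A's fill values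
theorem sU_mU_recurrence (zp : List Int) (n : Nat) (hn : n = zp.length)
    (hpre : Pre_zp_to_bp zp) :
    ∀ J, J ≤ n - 1 →
      (∀ t, t + 1 ≤ n - 1 → sU zp J t = max (mU zp J t) (sU zp J (t + 1) - 1)) ∧
        (0 < n → sU zp J (n - 1) = mU zp J (n - 1)) := by
  intro J
  induction J with
  | zero => exact fun _ => ⟨fun t ht => by simp [sU, mU], fun _ => by simp [sU, mU]⟩
  | succ J ihJ =>
    intro hJ
    obtain ⟨ih1, ih2⟩ := ihJ (by omega)
    set z := zp.getD (J + 1) 0 with hz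
    constructor
    · intro t ht
      have h1 := ih1 t ht
      have hM := mU_nonneg zp J t
      have hs1 := sU_nonneg zp J (t + 1)
      simp only [sU, mU, ← hz, max_def] at h1 ⊢
      split_ifs at h1 ⊢ <;> omega
    · intro hn0
      have h2 := ih2 hn0
      by_cases hzpos : 0 < z
      case neg =>
        have hb : z ≤ 0 := by omega
        simp only [sU, mU, ← hz, max_def] at h2 ⊢
        split_ifs at h2 ⊢ <;> omega
      case pos =>
        have hb : (J : Int) + 1 + z ≤ n := by
          have := hpre (J + 1) (by rw [List.mem_range]; omega) (by omega) hzpos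
          rw [← hz, ← hn] at this
          push_cast at this
          omega
        simp only [sU, mU, ← hz, max_def] at h2 ⊢
        split_ifs at h2 ⊢ <;> omega

theorem Fv_eq_sU (zp : List Int) (n : Nat) (hn : n = zp.length) (hpre : Pre_zp_to_bp zp)
    (hn0 : 0 < n) (mark : List Int)
    (hmark : ∀ e, e < n → mark.getD e 0 = mU zp (n - 1) e) :
    ∀ k t, t + k = n - 1 → Fv mark k t = sU zp (n - 1) t := by
  intro k
  induction k with
  | zero =>
    intro t ht
    have ht' : t = n - 1 := by omega
    subst ht'
    simp only [Fv]
    rw [hmark (n - 1) (by omega)]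
    exact ((sU_mU_recurrence zp n hn hpre (n - 1) (le_refl _)).2 hn0).symm
  | succ k ih =>
    intro t ht
    simp only [Fv]
    rw [hmark t (by omega), ih (t + 1) (by omega)]
    exact ((sU_mU_recurrence zp n hn hpre (n - 1) (le_refl _)).1 t (by omega)).symm

-- final getD-level agreement
theorem ports_agree (zp : List Int) (hpre : Pre_zp_to_bp zp) :
    (zp_to_bp zp).length = zp.length ∧ (zp_to_bp_alt zp).length = zp.length ∧
      ∀ m, m < zp.length → (zp_to_bp zp).getD m 0 = (zp_to_bp_alt zp).getD m 0 := by
  set n := zp.length with hn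
  obtain ⟨hAlen, hAval⟩ := zpA_outer_spec zp n hn.symm hpre (n - 1) (le_refl _)
  obtain ⟨hMlen, hMval⟩ := zpB_mark_spec zp n hn.symm hpre (n - 1) (le_refl _)
  rcases Nat.eq_zero_or_pos n with hn0 | hn0
  · refine ⟨by rw [zp_to_bp, ← hn, hn0]; simpa [hn0] using hAlen,
      by rw [zp_to_bp_alt, ← hn, hn0]; simp [zpB_mark, zpB_prop], fun m hm => by omega⟩
  obtain ⟨hPlen, hPhi, hPlo⟩ := zpB_prop_spec (n - 1) (zpB_mark zp (n - 1) (List.replicate n 0)) (by omega)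
  refine ⟨by rw [zp_to_bp, ← hn]; exact hAlen, by rw [zp_to_bp_alt, ← hn]; rw [hPlen, hMlen], fun m hm => ?_⟩
  rw [zp_to_bp, zp_to_bp_alt, ← hn]
  rw [hAval m hm]
  by_cases hmt : m < n - 1
  · rw [hPlo m hmt, Fv_eq_sU zp n hn.symm hpre hn0 _ hMval (n - 1 - m) m (by omega)]
  · have hm1 : m = n - 1 := by omega
    subst hm1
    rw [hPhi (n - 1) (le_refl _), hMval (n - 1) (by omega)]
    exact (sU_mU_recurrence zp n hn.symm hpre (n - 1) (le_refl _)).2 hn0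

theorem getD_ext {l1 l2 : List Int} (hlen : l1.length = l2.length)
    (h : ∀ m, m < l1.length → l1.getD m 0 = l2.getD m 0) : l1 = l2 := by
  apply List.ext_getElem hlen
  intro i h1 h2
  have := h i h1
  simpa [List.getD, List.getElem?_eq_getElem, h1, h2] using this

-- ===== VERDICT (by name: the statement is the Claim_ definition above) =====
theorem zp_to_bp_spec : Claim_equal_zp_to_bp := by
  intro zp _ hpre
  obtain ⟨h1, h2, h3⟩ := ports_agree zp hpre
  unfold Spec_zp_to_bp
  exact getD_ext (by omega) (fun m hm => h3 m (by omega))
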